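-- pv_equiv track=rewrite | github.com/weisrc/strong-align | strong_align/normalize.py | normalize_abbr
-- ===== SOURCE A (Python) =====
-- from typing import Tuple, List
--
-- ABBR = {
--     "en": {'dr.': "doctor", 'mr.': "mister", 'mrs.': "missus", 'prof.': "professor"},
--     "es": {'dr.': "doctor", 'sr.': "señor", 'sra.': "señora", 'prof.': "profesor"},
--     "fr": {'dr.': "docteur", 'm.': "monsieur", 'mme.': "madame", 'prof.': "professeur"},
--     "de": {'dr.': "doktor", 'prof.': "professor"},
--     "it": {'dr.': "dottore", 'prof.': "professore"},
--     "pt": {'dr.': "doutor", 'prof.': "professor"},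
-- }
--
-- def normalize_abbr(text: str, mappings: List[int], language: str, *_) -> Tuple[str, List[int]]:
--     if language not in ABBR:
--         return text, mappings
--     for abbr, value in ABBR[language].items():
--         while True:
--             start = text.find(abbr)
--             if start == -1:
--                 break
--             end = start + len(abbr)
--             text, mappings = insert_between(text, mappings, start, end, value)
--     return text, mappings
--
-- def insert_between(text: str, mappings: List[int], start: int, end: int, value: str):
--     mapped_start = mappings[start]
--     mapped_end = mappings[end-1]
--     insertion = []
--     for i in range(mapped_start, mapped_start + len(value)):
--         insertion.append(min(i, mapped_end))
--     return (text[:start] + value + text[end:],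
--             mappings[:start] + insertion + mappings[end:])
-- ===== SOURCE B (Python) =====
-- from typing import Tuple, List
--
-- ABBR = {
--     "en": {'dr.': "doctor", 'mr.': "mister", 'mrs.': "missus", 'prof.': "professor"},
--     "es": {'dr.': "doctor", 'sr.': "señor", 'sra.': "señora", 'prof.': "profesor"},
--     "fr": {'dr.': "docteur", 'm.': "monsieur", 'mme.': "madame", 'prof.': "professeur"},
--     "de": {'dr.': "doktor", 'prof.': "professor"},
--     "it": {'dr.': "dottore", 'prof.': "professore"},
--     "pt": {'dr.': "doutor", 'prof.': "professor"},
-- }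
--
-- def normalize_abbr(text: str, mappings: List[int], language: str, *_) -> Tuple[str, List[int]]:
--     if language not in ABBR:
--         return text, mappings
--     for abbr, value in ABBR[language].items():
--         text, mappings = _replace_all(text, mappings, abbr, value)
--     return text, mappings
--
-- def _replace_all(text: str, mappings: List[int], abbr: str, value: str):
--     # One left-to-right pass: jump from match to match, building the new text
--     # and mappings incrementally instead of re-finding from the start and
--     # rebuilding the whole pair after every single replacement.
--     out_t: List[str] = []
--     out_m: List[int] = []
--     i = 0
--     la = len(abbr)
--     while True:
--         j = text.find(abbr, i)
--         if j == -1: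
--             break
--         ms = mappings[j]
--         me = mappings[j + la - 1]
--         out_t.append(text[i:j])
--         out_m.extend(mappings[i:j])
--         out_t.append(value)
--         out_m.extend(min(ms + k, me) for k in range(len(value)))
--         i = j + la
--     out_t.append(text[i:])
--     out_m.extend(mappings[i:])
--     return "".join(out_t), out_m
-- ===== Notes on version B (the rewrite author's own statement) =====
-- stated objective: alternative
-- what changed: Per abbreviation, A repeatedly re-finds from the start of the text and rebuilds the whole text and mappings list after every single replacement; B makes one left-to-right pass per abbreviation, jumping with find(abbr, i) from match to match and appending the unchanged chunks and the replacements incrementally to output buffers.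
-- outside the precondition, e.g. on normalize_abbr('dr.', [0, 1], 'en'): A raises IndexError, B raises IndexError
import Mathlib
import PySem

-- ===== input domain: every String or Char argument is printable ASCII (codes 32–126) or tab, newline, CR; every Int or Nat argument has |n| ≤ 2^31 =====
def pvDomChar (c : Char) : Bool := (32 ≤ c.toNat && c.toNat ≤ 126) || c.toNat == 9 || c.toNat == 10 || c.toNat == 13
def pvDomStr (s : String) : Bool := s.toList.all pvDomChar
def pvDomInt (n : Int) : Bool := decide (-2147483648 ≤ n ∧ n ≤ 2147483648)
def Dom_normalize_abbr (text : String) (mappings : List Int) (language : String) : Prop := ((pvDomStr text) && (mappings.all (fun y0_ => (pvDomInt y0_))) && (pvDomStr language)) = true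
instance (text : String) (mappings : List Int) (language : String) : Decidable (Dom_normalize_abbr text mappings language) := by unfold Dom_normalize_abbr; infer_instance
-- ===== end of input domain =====

-- B replaces A's per-occurrence find-from-the-start + whole-text/whole-list rebuild by a single
-- left-to-right pass per abbreviation that jumps from match to match and builds the new text and
-- mappings incrementally.

-- ===== PORT A =====
-- The ABBR module constant, shared by both ports (dict of dicts, insertion order).
def ABBRtable : List (String × List (List Char × List Char)) :=
  [("en", [("dr.".toList, "doctor".toList), ("mr.".toList, "mister".toList),
           ("mrs.".toList, "missus".toList), ("prof.".toList, "professor".toList)]),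
   ("es", [("dr.".toList, "doctor".toList), ("sr.".toList, "señor".toList),
           ("sra.".toList, "señora".toList), ("prof.".toList, "profesor".toList)]),
   ("fr", [("dr.".toList, "docteur".toList), ("m.".toList, "monsieur".toList),
           ("mme.".toList, "madame".toList), ("prof.".toList, "professeur".toList)]),
   ("de", [("dr.".toList, "doktor".toList), ("prof.".toList, "professor".toList)]),
   ("it", [("dr.".toList, "dottore".toList), ("prof.".toList, "professore".toList)]),
   ("pt", [("dr.".toList, "doutor".toList), ("prof.".toList, "professor".toList)])]

-- A's `while True: start = text.find(abbr); … text, mappings = insert_between(…)` loop, with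
-- `insert_between` inlined step for step.  The `fuel` argument is a totality guard only: each
-- replacement removes one '.', so at most `text.count '.' ≤ text.length` iterations ever run.
def passA (p v : List Char) : Nat → List Char → List Int → List Char × List Int
  | 0, t, m => (t, m)
  | fuel+1, t, m =>
    let start := PySem.Chars.find t p
    if start = -1 then (t, m)
    else
      -- insert_between(text, mappings, start, end, value)
      let endd : Int := start + PySem.List.len p
      let ms := PySem.List.pyGetD m start 0            -- mappings[start]  (Pre_ keeps it in range)
      let me := PySem.List.pyGetD m (endd - 1) 0       -- mappings[end-1]
      let ins := (PySem.List.pyRange ms (ms + PySem.List.len v) 1).foldl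
                   (fun acc i => acc ++ [min i me]) []
      passA p v fuel
        (PySem.List.slice t none (some start) ++ v ++ PySem.List.slice t (some endd) none)
        (PySem.List.slice m none (some start) ++ ins ++ PySem.List.slice m (some endd) none)

def normalize_abbr (text : String) (mappings : List Int) (language : String) : String × List Int :=
  match ABBRtable.lookup language with
  | none => (text, mappings)
  | some pairs =>
      let r := pairs.foldl (fun st pv => passA pv.1 pv.2 (st.1.length + 1) st.1 st.2)
                 (text.toList, mappings)
      (String.ofList r.1, r.2)

-- ===== PORT B =====
-- B's single pass (`_replace_all`): `j = text.find(abbr, i)` jumps to the next match, the chunks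
-- text[i:j] / mappings[i:j] and the replacement are appended to accumulators, and i moves to j+len(abbr).
def passBgo (p v : List Char) (t : List Char) (m : List Int) (hp : p ≠ []) :
    (i : Nat) → i ≤ t.length → List Char → List Int → List Char × List Int := fun i hi accT accM =>
  let j := PySem.Chars.findFrom t p (i : Int) none
  if hj : j = -1 then
    (accT ++ PySem.List.slice t (some (i : Int)) none,
     accM ++ PySem.List.slice m (some (i : Int)) none)
  else
    have hs := PySem.Chars.findFrom_natCast_spec t p i hi hj
    have h1 : (i : Int) ≤ j := hs.1
    have h2 : p.length ≤ t.length - j.toNat := by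
      have := hs.2.1.length_le; rwa [List.length_drop] at this
    have hlt : j.toNat < t.length := by
      have : p.length ≠ 0 := by simpa using (List.length_pos_of_ne_nil hp).ne'
      omega
    have hjt : j.toNat + p.length ≤ t.length := by omega
    let ms := PySem.List.pyGetD m j 0                          -- mappings[j]
    let me := PySem.List.pyGetD m (j + PySem.List.len p - 1) 0 -- mappings[j+la-1]
    let ins := (List.range v.length).map fun (k : Nat) => min (ms + (k : Int)) me
    passBgo p v t m hp (j.toNat + p.length) hjt
      (accT ++ PySem.List.slice t (some (i : Int)) (some j) ++ v)
      (accM ++ PySem.List.slice m (some (i : Int)) (some j) ++ ins)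
termination_by i => t.length - i
decreasing_by
  have : p.length ≠ 0 := by simpa using (List.length_pos_of_ne_nil hp).ne'
  omega

def passB (p v : List Char) (t : List Char) (m : List Int) : List Char × List Int :=
  if hp : p = [] then (t, m)   -- totality guard only: every abbreviation in ABBRtable is nonempty
  else passBgo p v t m hp 0 (Nat.zero_le _) [] []

def normalize_abbr_alt (text : String) (mappings : List Int) (language : String) : String × List Int :=
  match ABBRtable.lookup language with
  | none => (text, mappings)
  | some pairs =>
      let r := pairs.foldl (fun st pv => passB pv.1 pv.2 st.1 st.2) (text.toList, mappings)
      (String.ofList r.1, r.2)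

-- ===== PRECONDITION & SPEC =====
-- Pre_ excludes, for a supported language, inputs whose mappings list is shorter than the text and
-- in which some abbreviation occurs: there A can raise IndexError when a match reaches past the end
-- of mappings (the bound is conservative and closed-form: it also drops inputs whose matches all
-- happen to stay in range, on which A and B return the same value).
def Pre_normalize_abbr (text : String) (mappings : List Int) (language : String) : Prop :=
  text.toList.length ≤ mappings.length ∨
    ∀ pv ∈ (ABBRtable.lookup language).getD [], ¬ pv.1 <:+: text.toList
instance (text : String) (mappings : List Int) (language : String) :
    Decidable (Pre_normalize_abbr text mappings language) := by
  unfold Pre_normalize_abbr; infer_instance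

def pvWitness_normalize_abbr : String × List Int × String := ("dr. x", ([0, 1, 2, 3, 4], "en"))

def Spec_normalize_abbr (text : String) (mappings : List Int) (language : String)
    (out : String × List Int) : Prop := out = normalize_abbr_alt text mappings language
instance (text : String) (mappings : List Int) (language : String) (out : String × List Int) :
    Decidable (Spec_normalize_abbr text mappings language out) := by
  unfold Spec_normalize_abbr; infer_instance

-- ===== CLAIM (what is proved, stated in full; the proofs are below) =====
def Claim_equal_normalize_abbr : Prop := ∀ (text : String) (mappings : List Int) (language : String), Dom_normalize_abbr text mappings language → Pre_normalize_abbr text mappings language → Spec_normalize_abbr text mappings language (normalize_abbr text mappings language)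

-- ===== LEMMAS AND PROOFS =====

-- the common reference computation both passes are reduced to: structural left-to-right scan
def insMap (ms me : Int) (n : Nat) : List Int := (List.range n).map fun (k : Nat) => min (ms + (k : Int)) me

def scan (p v : List Char) : List Char → List Int → List Char × List Int
  | [], m => ([], m)
  | c :: t, m =>
    if p <+: (c :: t) then
      (v ++ (scan p v (t.drop (p.length - 1)) (m.drop p.length)).1,
       insMap (m.getD 0 0) (m.getD (p.length - 1) 0) v.length
         ++ (scan p v (t.drop (p.length - 1)) (m.drop p.length)).2)
    else
      (c :: (scan p v t (m.drop 1)).1, m.take 1 ++ (scan p v t (m.drop 1)).2)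
termination_by t _ => t.length
decreasing_by
  all_goals (simp [List.length_drop]; try omega)

-- the facts about an (abbr, value) pair that the proof uses; all decidable, checked on the table
def GoodPair (p v : List Char) : Prop :=
  p ≠ [] ∧ p.getLast? = some '.' ∧ p.count '.' = 1 ∧ '.' ∉ v ∧ p.length ≤ v.length ∧
    ∀ k < p.length + 1, 0 < k → v.drop (v.length - k) ≠ p.take k

lemma getD_drop (m : List Int) (n k : Nat) (d : Int) : (m.drop n).getD k d = m.getD (n + k) d := by
  simp [List.getD, List.getElem?_drop]

lemma prefix_of_getElem? (p l : List Char) (h : ∀ i < p.length, l[i]? = p[i]?) : p <+: l := by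
  rw [List.prefix_iff_eq_take]
  apply List.ext_getElem?
  intro i
  rw [List.getElem?_take]
  by_cases hi : i < p.length
  · simp [hi, h i hi]
  · simp [hi]

lemma getElem?_of_prefix {p l : List Char} (h : p <+: l) : ∀ i < p.length, l[i]? = p[i]? := by
  obtain ⟨r, rfl⟩ := h
  intro i hi
  rw [List.getElem?_append_left hi]

-- no occurrence of p starts before |pre| + |v| in pre ++ v ++ suf
lemma nocc (p v pre suf : List Char) (hg : GoodPair p v)
    (hpre : ∀ j < pre.length, ¬ p <+: ((pre ++ p ++ suf).drop j)) :
    ∀ j < pre.length + v.length, ¬ p <+: ((pre ++ v ++ suf).drop j) := by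
  obtain ⟨hne, hlast, hcount, hdotv, hlenpv, hsuf⟩ := hg
  intro j hj hcon
  have hla : 0 < p.length := List.length_pos_of_ne_nil hne
  have hPlen := hcon.length_le
  rw [List.length_drop, List.length_append, List.length_append] at hPlen
  have hgetP : ∀ i < p.length, (pre ++ v ++ suf)[j + i]? = p[i]? := by
    intro i hi
    rw [← List.getElem?_drop]
    exact getElem?_of_prefix hcon i hi
  have hdot : (pre ++ v ++ suf)[j + (p.length - 1)]? = some '.' := by
    rw [hgetP _ (by omega), ← List.getLast?_eq_getElem?, hlast]
  rcases Nat.lt_or_ge (j + (p.length - 1)) pre.length with h1 | h1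
  · -- the whole match sits inside pre: contradicts minimality on the original text
    refine hpre j (by omega) (prefix_of_getElem? _ _ ?_)
    intro i hi
    rw [List.getElem?_drop]
    have e1 : (pre ++ p ++ suf)[j + i]? = pre[j + i]? := by
      rw [List.append_assoc, List.getElem?_append_left (by omega)]
    have e2 : (pre ++ v ++ suf)[j + i]? = pre[j + i]? := by
      rw [List.append_assoc, List.getElem?_append_left (by omega)]
    rw [e1, ← e2, hgetP i hi]
  · rcases Nat.lt_or_ge (j + (p.length - 1)) (pre.length + v.length) with h2 | h2
    · -- the '.' of the match would sit inside v
      apply hdotv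
      rw [List.append_assoc, List.getElem?_append_right (by omega),
          List.getElem?_append_left (by omega)] at hdot
      exact List.mem_of_getElem? hdot
    · -- the match starts strictly inside v: a suffix of v is a prefix of p
      have hjgt : pre.length < j := by omega
      apply hsuf (pre.length + v.length - j) (by omega) (by omega)
      apply List.ext_getElem?
      intro i
      by_cases hik : i < pre.length + v.length - j
      · rw [List.getElem?_drop, List.getElem?_take]
        rw [if_pos hik]
        have := hgetP i (by omega)
        rw [List.append_assoc, List.getElem?_append_right (by omega),
            List.getElem?_append_left (by omega)] at this
        rw [show v.length - (pre.length + v.length - j) + i = j + i - pre.length by omega]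
        exact this
      · rw [List.getElem?_eq_none, List.getElem?_eq_none]
        · rw [List.length_take]; omega
        · rw [List.length_drop]; omega

lemma scan_nomatch (p v : List Char) (t : List Char) (m : List Int)
    (h : ∀ j, ¬ p <+: t.drop j) : scan p v t m = (t, m) := by
  induction t generalizing m with
  | nil => simp [scan]
  | cons c t ih =>
    have h0 : ¬ p <+: (c :: t) := by have := h 0; simpa using this
    rw [scan, if_neg h0, ih _ (fun j => by have := h (j + 1); simpa using this)]
    rw [Prod.mk.injEq]
    refine ⟨rfl, ?_⟩
    cases m <;> simp

lemma scan_copy (p v a rest : List Char) (m : List Int)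
    (h : ∀ j < a.length, ¬ p <+: ((a ++ rest).drop j)) :
    scan p v (a ++ rest) m
      = (a ++ (scan p v rest (m.drop a.length)).1,
         m.take a.length ++ (scan p v rest (m.drop a.length)).2) := by
  induction a generalizing m with
  | nil => simp
  | cons c a ih =>
    have h0 : ¬ p <+: (c :: (a ++ rest)) := by have := h 0 (by simp); simpa using this
    rw [List.cons_append, scan, if_neg h0,
        ih _ (fun j hj => by have := h (j + 1) (by simp; omega); simpa using this)]
    have hd : (m.drop 1).drop a.length = m.drop (a.length + 1) := by
      rw [List.drop_drop]; ring_nf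
    have ht : m.take (1 + a.length) = m.take 1 ++ (m.drop 1).take a.length := List.take_add
    rw [hd, ← List.append_assoc, ← ht, show 1 + a.length = a.length + 1 by omega]
    simp

lemma scan_match (p v t : List Char) (m : List Int) (hp : p ≠ []) (h : p <+: t) :
    scan p v t m
      = (v ++ (scan p v (t.drop p.length) (m.drop p.length)).1,
         insMap (m.getD 0 0) (m.getD (p.length - 1) 0) v.length
           ++ (scan p v (t.drop p.length) (m.drop p.length)).2) := by
  obtain ⟨n, hn⟩ : ∃ n, p.length = n + 1 :=
    ⟨p.length - 1, by have := List.length_pos_of_ne_nil hp; omega⟩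
  cases t with
  | nil =>
    exact absurd (List.prefix_nil.mp h) hp
  | cons c t =>
    rw [scan, if_pos h]
    simp [hn]

lemma length_insMap (ms me : Int) (n : Nat) : (insMap ms me n).length = n := by
  simp [insMap]

lemma scan_len (p v : List Char) : ∀ (t : List Char) (m : List Int), t.length ≤ m.length →
    (scan p v t m).1.length ≤ (scan p v t m).2.length := by
  intro t m
  induction t, m using scan.induct p with
  | case1 m => intro _; simp [scan]
  | case2 c t m hpre ih =>
    intro hlen
    have hple := hpre.length_le
    rw [scan, if_pos hpre]
    simp only [List.length_append, length_insMap]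
    have := ih (by simp at hlen hple ⊢; omega)
    omega
  | case3 c t m hnp ih =>
    intro hlen
    rw [scan, if_neg hnp]
    simp only [List.length_cons] at hlen
    have hih := ih (by rw [List.length_drop]; omega)
    simp only [List.length_cons, List.length_append, List.length_take]
    omega

lemma passA_eq_scan (p v : List Char) (hg : GoodPair p v) :
    ∀ fuel (t : List Char) (m : List Int), t.count '.' < fuel → t.length ≤ m.length →
      passA p v fuel t m = scan p v t m := by
  intro fuel
  induction fuel with
  | zero => intro t m hd _; omega
  | succ fuel ih =>
    intro t m hd hm
    by_cases hf : PySem.Chars.find t p = -1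
    · simp only [passA]
      rw [if_pos hf, scan_nomatch]
      intro j hpj
      exact (PySem.Chars.find_eq_neg_one_iff t p).mp hf
        ((PySem.Chars.isIn_iff_infix p t).mp ((PySem.Chars.exists_prefix_drop_iff_isIn p t).mp ⟨j, hpj⟩))
    · have hla : 0 < p.length := List.length_pos_of_ne_nil hg.1
      have h0 : 0 ≤ PySem.Chars.find t p := by
        have := PySem.Chars.neg_one_le_find t p
        omega
      obtain ⟨hpref, hmin⟩ := PySem.Chars.find_spec h0
      set s := (PySem.Chars.find t p).toNat with hsdef
      have hfs : PySem.Chars.find t p = (s : Int) := by omega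
      have hsle : s ≤ t.length := by
        have := PySem.Chars.find_le_length t p
        omega
      have hsla : s + p.length ≤ t.length := by
        have := hpref.length_le; rw [List.length_drop] at this; omega
      have hdropdecomp : t.drop s = p ++ t.drop (s + p.length) := by
        obtain ⟨r, hr⟩ := hpref
        have hr2 : t.drop (s + p.length) = r := by
          have h' := congrArg (List.drop p.length) hr
          simpa [List.drop_drop, List.drop_left, Nat.add_comm] using h'.symm
        rw [hr2, hr]
      have ht : t = t.take s ++ (p ++ t.drop (s + p.length)) := by
        rw [← hdropdecomp, List.take_append_drop]
      have ht' : t.take s ++ p ++ t.drop (s + p.length) = t := by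
        rw [List.append_assoc, ← ht]
      -- one unfolding of A's loop body, normalised to take/drop/getD/insMap form
      have hstep : passA p v (fuel + 1) t m
          = passA p v fuel
              (t.take s ++ v ++ t.drop (s + p.length))
              (m.take s ++ insMap (m.getD s 0) (m.getD (s + p.length - 1) 0) v.length
                ++ m.drop (s + p.length)) := by
        simp only [passA, PySem.List.len_eq]
        rw [if_neg hf, hfs]
        rw [show (s : Int) + (p.length : Int) = ((s + p.length : Nat) : Int) by push_cast; ring]
        rw [PySem.List.slice_to_natCast, PySem.List.slice_to_natCast,
            PySem.List.slice_from_natCast, PySem.List.slice_from_natCast]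
        rw [show ((s + p.length : Nat) : Int) - 1 = ((s + p.length - 1 : Nat) : Int) by omega]
        rw [PySem.List.pyGetD_natCast, PySem.List.pyGetD_natCast]
        rw [PySem.List.foldl_append_singleton_eq_map, PySem.List.pyRange_one]
        rw [show m.getD s 0 + (v.length : Int) - m.getD s 0 = (v.length : Int) by ring]
        rw [Int.toNat_natCast, List.map_map]
        have hins : insMap (m.getD s 0) (m.getD (s + p.length - 1) 0) v.length
            = List.map ((fun i => min i (m.getD (s + p.length - 1) 0)) ∘ fun k => m.getD s 0 + ↑k)
                (List.range v.length) := by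
          unfold insMap
          exact List.map_congr_left fun a _ => by simp
        rw [hins]
        simp only [List.nil_append]
      rw [hstep]
      have hcv : v.count '.' = 0 := List.count_eq_zero.mpr hg.2.2.2.1
      have hct : t.count '.' = (t.take s).count '.' + 1 + (t.drop (s + p.length)).count '.' := by
        conv_lhs => rw [ht]
        simp [List.count_append, hg.2.2.1]
        omega
      have hlens : (t.take s).length = s := by rw [List.length_take]; omega
      have hlenm : (m.take s).length = s := by rw [List.length_take]; omega
      rw [ih _ _ (by simp [List.count_append, hcv]; omega)
            (by simp only [List.length_append, List.length_drop, length_insMap, hlens, hlenm]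
                omega)]
      -- scan (pre ++ v ++ suf) M = scan t m
      conv_rhs => rw [ht]
      rw [scan_copy p v (t.take s) _ m
            (by intro j hj; rw [show t.take s ++ (p ++ t.drop (s + p.length)) = t from ht.symm]
                exact hmin j (by omega))]
      rw [scan_match p v _ _ hg.1 (List.prefix_append p _)]
      rw [← List.append_assoc (t.take s) v]
      rw [scan_copy p v (t.take s ++ v) _ _
            (by intro j hj
                refine nocc p v (t.take s) (t.drop (s + p.length)) hg ?_ j (by simp [hlens] at hj ⊢; omega)
                intro j' hj'
                rw [ht']
                exact hmin j' (by rw [hlens] at hj'; omega))]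
      rw [List.drop_left, hlens]
      simp only [List.length_append, hlens]
      rw [getD_drop, getD_drop, Nat.add_zero,
          show s + (p.length - 1) = s + p.length - 1 by omega]
      rw [show (m.take s ++ insMap (m.getD s 0) (m.getD (s + p.length - 1) 0) v.length
                ++ m.drop (s + p.length)).take (s + v.length)
            = m.take s ++ insMap (m.getD s 0) (m.getD (s + p.length - 1) 0) v.length from by
          rw [List.take_left']
          simp [hlenm, length_insMap]]
      rw [show (m.take s ++ insMap (m.getD s 0) (m.getD (s + p.length - 1) 0) v.length
                ++ m.drop (s + p.length)).drop (s + v.length)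
            = m.drop (s + p.length) from by
          rw [List.drop_left']
          simp [hlenm, length_insMap]]
      simp [List.append_assoc]

lemma passBgo_eq_scan (p v t : List Char) (m : List Int) (hp : p ≠ []) :
    ∀ i (hi : i ≤ t.length) accT accM,
      passBgo p v t m hp i hi accT accM
        = (accT ++ (scan p v (t.drop i) (m.drop i)).1,
           accM ++ (scan p v (t.drop i) (m.drop i)).2) := by
  have hla : 0 < p.length := List.length_pos_of_ne_nil hp
  suffices H : ∀ n i (hi : i ≤ t.length), t.length - i = n → ∀ accT accM,
      passBgo p v t m hp i hi accT accM
        = (accT ++ (scan p v (t.drop i) (m.drop i)).1,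
           accM ++ (scan p v (t.drop i) (m.drop i)).2) by
    exact fun i hi accT accM => H (t.length - i) i hi rfl accT accM
  intro n
  induction n using Nat.strong_induction_on with
  | _ n IH =>
    intro i hi hn accT accM
    rw [passBgo]
    by_cases hj : PySem.Chars.findFrom t p (i : Int) none = -1
    · rw [dif_pos hj]
      have hni : ¬ p <:+: t.drop i :=
        (PySem.Chars.findFrom_natCast_eq_neg_one_iff t p i hi).mp hj
      rw [scan_nomatch p v (t.drop i) (m.drop i) (fun q hpq => hni
        ((PySem.Chars.isIn_iff_infix p (t.drop i)).mp
          ((PySem.Chars.exists_prefix_drop_iff_isIn p (t.drop i)).mp ⟨q, hpq⟩)))]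
      rw [PySem.List.slice_from_natCast, PySem.List.slice_from_natCast]
    · rw [dif_neg hj]
      obtain ⟨hij, hpref, hmin⟩ := PySem.Chars.findFrom_natCast_spec t p i hi hj
      set j := (PySem.Chars.findFrom t p (i : Int) none).toNat with hjdef
      have hjcast : PySem.Chars.findFrom t p (i : Int) none = (j : Int) := by omega
      have hjla : j + p.length ≤ t.length := by
        have := hpref.length_le; rw [List.length_drop] at this; omega
      have hij' : i ≤ j := by omega
      simp only [hjcast, Int.toNat_natCast, PySem.List.len_eq]
      rw [PySem.List.slice_natCast, PySem.List.slice_natCast]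
      rw [show (j : Int) + (p.length : Int) - 1 = ((j + p.length - 1 : Nat) : Int) by omega]
      rw [PySem.List.pyGetD_natCast, PySem.List.pyGetD_natCast]
      rw [IH (t.length - (j + p.length)) (by omega) (j + p.length) (by omega) rfl]
      -- now reduce the scan of t.drop i
      have hsplit : t.drop i = (t.drop i).take (j - i) ++ t.drop j := by
        conv_lhs => rw [← List.take_append_drop (j - i) (t.drop i)]
        rw [List.drop_drop, show i + (j - i) = j by omega]
      have hlentk : ((t.drop i).take (j - i)).length = j - i := by
        rw [List.length_take, List.length_drop]; omega
      conv_rhs => rw [hsplit]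
      rw [scan_copy p v _ _ (m.drop i)
            (by rw [← hsplit]
                intro q hq
                rw [List.drop_drop]
                exact hmin (i + q) (by omega) (by rw [hlentk] at hq; omega))]
      rw [scan_match p v _ _ hp hpref]
      rw [hlentk]
      simp only [List.drop_drop]
      rw [show i + (j - i) = j by omega]
      rw [getD_drop, getD_drop, Nat.add_zero,
          show j + (p.length - 1) = j + p.length - 1 by omega]
      simp [insMap, List.append_assoc]

lemma passB_eq_scan (p v : List Char) (hp : p ≠ []) (t : List Char) (m : List Int) :
    passB p v t m = scan p v t m := by
  rw [passB, dif_neg hp, passBgo_eq_scan]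
  simp

lemma passA_eq_passB (p v : List Char) (hg : GoodPair p v) (t : List Char) (m : List Int)
    (h : t.length ≤ m.length) : passA p v (t.length + 1) t m = passB p v t m := by
  rw [passB_eq_scan p v hg.1,
      passA_eq_scan p v hg _ t m (by have := List.count_le_length (l := t) (a := '.'); omega) h]

lemma fold_eq (pairs : List (List Char × List Char))
    (hgood : ∀ pv ∈ pairs, GoodPair pv.1 pv.2) (t : List Char) (m : List Int)
    (h : t.length ≤ m.length) :
    pairs.foldl (fun st pv => passA pv.1 pv.2 (st.1.length + 1) st.1 st.2) (t, m)
      = pairs.foldl (fun st pv => passB pv.1 pv.2 st.1 st.2) (t, m) := by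
  induction pairs generalizing t m with
  | nil => rfl
  | cons pv rest ih =>
    have hg := hgood pv List.mem_cons_self
    simp only [List.foldl_cons]
    rw [passA_eq_passB pv.1 pv.2 hg t m h, passB_eq_scan pv.1 pv.2 hg.1]
    exact ih (fun q hq => hgood q (List.mem_cons_of_mem _ hq)) _ _ (scan_len pv.1 pv.2 t m h)

lemma passA_id (p v : List Char) (t : List Char) (m : List Int) (fuel : Nat)
    (h : ¬ p <:+: t) : passA p v (fuel + 1) t m = (t, m) := by
  simp only [passA]
  rw [if_pos ((PySem.Chars.find_eq_neg_one_iff t p).mpr h)]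

lemma passB_id (p v : List Char) (t : List Char) (m : List Int)
    (h : ¬ p <:+: t) : passB p v t m = (t, m) := by
  rw [passB]
  split
  · rfl
  · rw [passBgo_eq_scan, scan_nomatch p v _ _ (fun q hpq => h
      ((PySem.Chars.isIn_iff_infix p t).mp
        ((PySem.Chars.exists_prefix_drop_iff_isIn p t).mp ⟨q, by simpa using hpq⟩)))]
    simp

lemma fold_id (pairs : List (List Char × List Char)) (t : List Char) (m : List Int)
    (hocc : ∀ pv ∈ pairs, ¬ pv.1 <:+: t) :
    pairs.foldl (fun st pv => passA pv.1 pv.2 (st.1.length + 1) st.1 st.2) (t, m) = (t, m) ∧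
    pairs.foldl (fun st pv => passB pv.1 pv.2 st.1 st.2) (t, m) = (t, m) := by
  induction pairs generalizing m with
  | nil => exact ⟨rfl, rfl⟩
  | cons pv rest ih =>
    have h0 := hocc pv List.mem_cons_self
    simp only [List.foldl_cons]
    rw [passA_id pv.1 pv.2 t m _ h0, passB_id pv.1 pv.2 t m h0]
    exact ih _ (fun q hq => hocc q (List.mem_cons_of_mem _ hq))

lemma lookup_good (language : String) (pairs : List (List Char × List Char))
    (h : ABBRtable.lookup language = some pairs) : ∀ pv ∈ pairs, GoodPair pv.1 pv.2 := by
  unfold ABBRtable at h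
  simp only [List.lookup] at h
  repeat' split at h
  all_goals first | (cases h; unfold GoodPair; decide) | simp_all

-- ===== VERDICT (by name: the statement is the Claim_ definition above) =====
theorem normalize_abbr_spec : Claim_equal_normalize_abbr := by
  intro text mappings language _ hpre
  unfold Spec_normalize_abbr normalize_abbr normalize_abbr_alt
  unfold Pre_normalize_abbr at hpre
  rcases hlook : ABBRtable.lookup language with _ | pairs
  · rfl
  · simp only []
    rw [hlook] at hpre
    simp only [Option.getD_some] at hpre
    rcases hpre with hlen | hocc
    · rw [fold_eq pairs (lookup_good language pairs hlook) _ _ hlen]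
    · rw [(fold_id pairs _ _ hocc).1, (fold_id pairs _ _ hocc).2]
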